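-- pv_equiv track=rewrite | github.com/CihanOzden9/LeetcodeProblems | hash_set/Equal_Row_and_Column_Pairs.py | func
-- ===== SOURCE A (Python) =====
-- def func(grid):
--     len_grid = len(grid)
--
--     rows = [row[:] for row in grid]
--
--     cols = []
--     for i in range(len_grid):
--         col = []
--         for k in range(len_grid):
--             col.append(grid[k][i])
--         cols.append(col)
--
--
--     combined = rows + cols
--
--     result = set(map(tuple, combined))
--     if len(result) == 1:
--         return len_grid * 2
--     return len_grid * 2 - len(result)
-- ===== SOURCE B (Python) =====
-- def func(grid):
--     n = len(grid)
--     tuples = [tuple(row) for row in grid] + \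
--              [tuple(row[i] for row in grid) for i in range(n)]
--     tuples.sort()
--     distinct = 0
--     prev = None
--     for t in tuples:
--         if t != prev:
--             distinct += 1
--             prev = t
--     if distinct <= 1:
--         return 2 * n
--     return 2 * n - distinct
-- ===== Notes on version B (the rewrite author's own statement) =====
-- stated objective: alternative
-- what changed: B collects the 2n row/column tuples, sorts them, and counts distinct tuples in one adjacent-difference scan (returning 2n when the distinct count is <= 1, matching A's special case), instead of A's hash-set deduplication.
import Mathlib
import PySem

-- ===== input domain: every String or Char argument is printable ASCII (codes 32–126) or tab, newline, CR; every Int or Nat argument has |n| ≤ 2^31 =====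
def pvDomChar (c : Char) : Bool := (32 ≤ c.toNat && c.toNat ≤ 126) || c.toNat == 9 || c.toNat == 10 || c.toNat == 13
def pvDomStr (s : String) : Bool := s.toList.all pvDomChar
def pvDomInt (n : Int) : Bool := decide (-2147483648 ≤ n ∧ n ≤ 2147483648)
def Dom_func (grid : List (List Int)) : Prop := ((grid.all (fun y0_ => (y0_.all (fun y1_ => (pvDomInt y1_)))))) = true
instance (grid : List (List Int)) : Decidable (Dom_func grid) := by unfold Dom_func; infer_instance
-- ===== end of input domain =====

-- B replaces A's hash-set deduplication of the 2n row/column tuples by sorting them and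
-- counting distinct tuples in one adjacent-difference scan (objective: alternative, not faster).

-- ===== PORT A =====
def func (grid : List (List Int)) : Int :=
  let lenGrid : Int := grid.length
  let rows : List (List Int) := grid.map (fun row => PySem.List.slice row none none)
  let cols : List (List Int) :=
    (PySem.List.pyRange 0 lenGrid 1).foldl (fun cs i =>
      cs ++ [ (PySem.List.pyRange 0 lenGrid 1).foldl (fun col k =>
        col ++ [PySem.List.pyGetD (PySem.List.pyGetD grid k []) i 0]) [] ]) []
  let combined := rows ++ cols
  let result : PySem.Set (List Int) := PySem.Set.ofList combined
  if (result.length : Int) = 1 then lenGrid * 2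
  else lenGrid * 2 - (result.length : Int)

-- ===== PORT B =====
def func_alt (grid : List (List Int)) : Int :=
  let n : Int := grid.length
  let tuples : List (List Int) :=
    grid.map (fun row => row) ++
    (PySem.List.pyRange 0 n 1).map (fun i => grid.map (fun row => PySem.List.pyGetD row i 0))
  let s := @PySem.List.sorted (List Int) (List Int) List.instLinearOrder.toLT
    LinearOrder.toDecidableLT tuples (fun x => x) false
  let scan := s.foldl (fun (st : Int × Option (List Int)) t =>
    if some t ≠ st.2 then (st.1 + 1, some t) else st) ((0 : Int), (none : Option (List Int)))
  if scan.1 ≤ 1 then 2 * n else 2 * n - scan.1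

-- ===== PRECONDITION & SPEC =====
-- A indexes grid[k][i] for all i, k < len(grid): it raises IndexError when some row is
-- shorter than the number of rows; exactly those inputs are excluded.
def Pre_func (grid : List (List Int)) : Prop := ∀ row ∈ grid, grid.length ≤ row.length
instance (grid : List (List Int)) : Decidable (Pre_func grid) := by unfold Pre_func; infer_instance

def pvWitness_func : List (List Int) := [[3, 2], [2, 3]]

def Spec_func (grid : List (List Int)) (out : Int) : Prop := out = func_alt grid
instance (grid : List (List Int)) (out : Int) : Decidable (Spec_func grid out) := by unfold Spec_func; infer_instance

-- ===== CLAIM (what is proved, stated in full; the proofs are below) =====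
def Claim_equal_func : Prop := ∀ (grid : List (List Int)), Dom_func grid → Pre_func grid → Spec_func grid (func grid)

-- ===== LEMMAS AND PROOFS =====

-- B's scan step, named for the lemmas below (identical to the lambda in func_alt).
def pvStep (st : Int × Option (List Int)) (t : List Int) : Int × Option (List Int) :=
  if some t ≠ st.2 then (st.1 + 1, some t) else st

lemma pvStep_eq (s : List (List Int)) (init : Int × Option (List Int)) :
    s.foldl (fun (st : Int × Option (List Int)) t =>
      if some t ≠ st.2 then (st.1 + 1, some t) else st) init = s.foldl pvStep init := rfl

lemma pvCardInsert (T : Finset (List Int)) (x : List Int) :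
    (insert x T).card = 1 + (T.erase x).card := by
  by_cases h : x ∈ T
  · rw [Finset.insert_eq_self.mpr h, Finset.card_erase_of_mem h]
    have := Finset.card_pos.mpr ⟨x, h⟩
    omega
  · rw [Finset.card_insert_of_notMem h, Finset.erase_eq_of_notMem h]; omega

-- the scan over a sorted tail starting after p counts the distinct elements other than p
lemma pvScanAux (s : List (List Int)) : ∀ (p : List Int) (d : Int),
    s.Pairwise (· ≤ ·) → (∀ y ∈ s, p ≤ y) →
    (s.foldl pvStep (d, some p)).1 = d + ((s.toFinset.erase p).card : Int) := by
  induction s with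
  | nil => intro p d _ _; simp
  | cons x t ih =>
    intro p d hpair hle
    have hx : ∀ y ∈ t, x ≤ y := (List.pairwise_cons.mp hpair).1
    have ht : t.Pairwise (· ≤ ·) := (List.pairwise_cons.mp hpair).2
    have hpx : p ≤ x := hle x (by simp)
    by_cases hxp : x = p
    · subst hxp
      have : pvStep (d, some x) x = (d, some x) := by simp [pvStep]
      rw [List.foldl_cons, this, ih x d ht hx]
      have : (x :: t).toFinset.erase x = t.toFinset.erase x := by
        simp [List.toFinset_cons, Finset.erase_insert_eq_erase]
      rw [this]
    · have hplt : p < x := lt_of_le_of_ne hpx (fun h => hxp h.symm)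
      have hstep : pvStep (d, some p) x = (d + 1, some x) := by
        simp [pvStep, fun h => hxp h]
      rw [List.foldl_cons, hstep, ih x (d + 1) ht hx]
      have hpnot : p ∉ (x :: t).toFinset := by
        simp only [List.mem_toFinset, List.mem_cons, not_or]
        exact ⟨fun h => hxp h.symm, fun h => absurd (hx p h) (not_le.mpr hplt)⟩
      have herase : (x :: t).toFinset.erase p = (x :: t).toFinset :=
        Finset.erase_eq_of_notMem hpnot
      rw [herase]
      have : (x :: t).toFinset = insert x t.toFinset := by simp
      rw [this, pvCardInsert]
      push_cast
      ring

-- the whole scan over sorted(L) computes the number of distinct elements of L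
lemma pvScanCount (L : List (List Int)) :
    ((@PySem.List.sorted (List Int) (List Int) List.instLinearOrder.toLT LinearOrder.toDecidableLT L (fun x => x) false).foldl pvStep ((0 : Int), none)).1
      = (L.toFinset.card : Int) := by
  have hperm := @PySem.List.sorted_perm (List Int) (List Int) List.instLinearOrder.toLT LinearOrder.toDecidableLT L (fun x => x) false
  have hfin : (@PySem.List.sorted (List Int) (List Int) List.instLinearOrder.toLT LinearOrder.toDecidableLT L (fun x => x) false).toFinset = L.toFinset :=
    List.toFinset_eq_of_perm _ _ hperm
  have hpair : (@PySem.List.sorted (List Int) (List Int) List.instLinearOrder.toLT LinearOrder.toDecidableLT L (fun x => x) false).Pairwise (· ≤ ·) :=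
    PySem.List.sorted_pairwise L (fun x => x)
  rw [← hfin]
  cases hs : @PySem.List.sorted (List Int) (List Int) List.instLinearOrder.toLT LinearOrder.toDecidableLT L (fun x => x) false with
  | nil => simp
  | cons x t =>
    rw [hs] at hpair
    have hx : ∀ y ∈ t, x ≤ y := (List.pairwise_cons.mp hpair).1
    have ht : t.Pairwise (· ≤ ·) := (List.pairwise_cons.mp hpair).2
    have hstep : pvStep (0, none) x = (1, some x) := by simp [pvStep]
    rw [List.foldl_cons, hstep, pvScanAux t x 1 ht hx]
    have : (x :: t).toFinset = insert x t.toFinset := by simp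
    rw [this, pvCardInsert]
    push_cast
    ring

-- A's set size is also the number of distinct elements
lemma pvSetLen (L : List (List Int)) :
    (PySem.Set.ofList L : List (List Int)).length = L.toFinset.card := by
  rw [← PySem.List.dedup_eq_ofList]
  have hfin : (PySem.List.dedup L).toFinset = L.toFinset := by
    apply Finset.ext
    intro a
    rw [List.mem_toFinset, List.mem_toFinset, PySem.List.mem_dedup]
  rw [← hfin, List.toFinset_card_of_nodup (PySem.List.nodup_dedup L)]

-- under Pre_, A's column loop builds the same tuples as B's comprehension
lemma pvColsEq (grid : List (List Int)) (i : Int) :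
    (PySem.List.pyRange 0 (grid.length : Int) 1).foldl (fun col k =>
        col ++ [PySem.List.pyGetD (PySem.List.pyGetD grid k []) i 0]) []
      = grid.map (fun row => PySem.List.pyGetD row i 0) := by
  rw [PySem.List.foldl_append_singleton_eq_map, List.nil_append]
  conv_lhs => rw [show (fun k => PySem.List.pyGetD (PySem.List.pyGetD grid k []) i 0)
    = (fun row => PySem.List.pyGetD row i 0) ∘ (fun k => PySem.List.pyGetD grid k []) from rfl,
    ← List.map_map, PySem.List.map_pyGetD_pyRange_zero' (xs := grid) (d := [])]

-- ===== VERDICT (by name: the statement is the Claim_ definition above) =====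
theorem func_spec : Claim_equal_func := by
  intro grid _ hpre
  show func grid = func_alt grid
  unfold func func_alt
  simp only [pvStep_eq]
  have hrows : grid.map (fun row => PySem.List.slice row none none) = grid.map (fun row => row) := by
    apply List.map_congr_left
    intro row _
    simp [pysem]
  have hcols : (PySem.List.pyRange 0 (grid.length : Int) 1).foldl (fun cs i =>
      cs ++ [ (PySem.List.pyRange 0 (grid.length : Int) 1).foldl (fun col k =>
        col ++ [PySem.List.pyGetD (PySem.List.pyGetD grid k []) i 0]) [] ]) []
      = (PySem.List.pyRange 0 (grid.length : Int) 1).map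
          (fun i => grid.map (fun row => PySem.List.pyGetD row i 0)) := by
    rw [PySem.List.foldl_append_singleton_eq_map, List.nil_append]
    apply List.map_congr_left
    intro i _
    exact pvColsEq grid i
  rw [hrows, hcols]
  set L := grid.map (fun row => row) ++
    (PySem.List.pyRange 0 (grid.length : Int) 1).map
      (fun i => grid.map (fun row => PySem.List.pyGetD row i 0)) with hL
  rw [pvScanCount L, pvSetLen L]
  set c := L.toFinset.card with hc
  by_cases h1 : (c : Int) = 1
  · simp [h1]
    omega
  · rw [if_neg h1]
    by_cases h2 : (c : Int) ≤ 1
    · have hc0 : c = 0 := by omega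
      rw [if_pos (by omega)]
      omega
    · rw [if_neg h2]
      ring
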